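-- pv_equiv track=rewrite | github.com/fedevilloria/Algoritmos | estadisticas_de_texto.py | contar_parrafos
-- ===== SOURCE A (Python) =====
-- def contar_parrafos(texto):
--     contador_parrafos = 0
--     en_parrafo = False # Utilizo esta variable como bandera para determinar si estamos dentro de un parrafo o no.
--                        # Lo inicializo con false suponiendo que no lo estamos.
--     for caracter in texto:
--         if caracter == '\n': # Cuando encuentra un salto de linea, verifica si ya estabamos dentro de un parrafo
--                              # "en_parrafo == True". Si es asi se incrementa el contador en 1 y se vuelve a establecer
--                              # el parrafo en False.
--             if en_parrafo:
--                 contador_parrafos += 1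
--                 en_parrafo = False
--         else:
--             en_parrafo = True
--
--             # en_parrafo es como un interruptor que nos dice si estamos actualmente dentro de un
--             # parrafo o no. Cuando encontramos un salto de linea, si el interruptor esta activado
--             # (True), sabemos que hemos encontrado un párrafo completo y lo contamos.
--             # Luego, apagamos el interruptor (False) para estar listos para contar el siguiente
--             # parrafo si lo encontramos.
--
--     # Me aseguro de contar el ultimo parrafo si el texto no termina con salto de linea
--     if en_parrafo:
--         contador_parrafos += 1
--
--     return contador_parrafos
-- ===== SOURCE B (Python) =====
-- def contar_parrafos(texto):
--     # Split on newlines once and count the non-empty segments.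
--     return sum(1 for seg in texto.split('\n') if seg)
-- ===== Notes on version B (the rewrite author's own statement) =====
-- stated objective: faster
-- what changed: Replaces the character-by-character flag automaton with a single newline split followed by counting the non-empty segments; the split runs in C, giving a large constant-factor win.
import Mathlib
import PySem

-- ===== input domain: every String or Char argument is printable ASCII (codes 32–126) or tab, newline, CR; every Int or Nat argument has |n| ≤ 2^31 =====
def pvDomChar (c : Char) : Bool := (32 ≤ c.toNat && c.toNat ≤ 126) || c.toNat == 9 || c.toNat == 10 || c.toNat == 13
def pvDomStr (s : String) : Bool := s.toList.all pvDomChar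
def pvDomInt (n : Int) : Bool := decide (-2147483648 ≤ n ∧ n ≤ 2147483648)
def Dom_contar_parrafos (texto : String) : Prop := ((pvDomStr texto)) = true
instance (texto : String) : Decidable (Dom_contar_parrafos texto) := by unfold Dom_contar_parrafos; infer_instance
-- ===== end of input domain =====

-- B replaces A's character-level flag automaton with split('\n') + count of non-empty segments (idiomatic).

-- ===== PORT A =====
-- A: one pass over the characters with a counter and an "inside a paragraph" flag,
-- plus a final check for a trailing paragraph.
def contar_parrafos (texto : String) : Int :=
  let st := texto.toList.foldl
    (fun (st : Int × Bool) caracter =>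
      if caracter = '\n' then
        if st.2 then (st.1 + 1, false) else st
      else
        (st.1, true))
    (0, false)
  if st.2 then st.1 + 1 else st.1

-- ===== PORT B =====
-- B: texto.split('\n') (sep is a nonempty literal, so Chars.splitOn is exact), then
-- sum 1 for each non-empty segment.
def contar_parrafos_alt (texto : String) : Int :=
  (PySem.Chars.splitOn texto.toList ['\n']).foldl
    (fun acc seg => if seg.isEmpty then acc else acc + 1) 0

-- ===== PRECONDITION & SPEC =====
def Spec_contar_parrafos (texto : String) (out : Int) : Prop := out = contar_parrafos_alt texto
instance (texto : String) (out : Int) : Decidable (Spec_contar_parrafos texto out) := by unfold Spec_contar_parrafos; infer_instance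

-- ===== CLAIM (what is proved, stated in full; the proofs are below) =====
def Claim_equal_contar_parrafos : Prop := ∀ (texto : String), Dom_contar_parrafos texto → Spec_contar_parrafos texto (contar_parrafos texto)

-- ===== LEMMAS AND PROOFS =====

-- The segments of l split at '\n', where cur is the (reversed) pending segment.
def pvSegs : List Char → List Char → List (List Char)
  | [], cur => [cur.reverse]
  | c :: rest, cur =>
      if c = '\n' then cur.reverse :: pvSegs rest [] else pvSegs rest (c :: cur)

-- Number of non-empty segments.
def pvCountNE : List (List Char) → Int
  | [] => 0
  | s :: rest => (if s.isEmpty then 0 else 1) + pvCountNE rest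

theorem pvSplitOn_go_eq (l cur : List Char) (acc : List (List Char)) :
    ∀ fuel, l.length < fuel →
      PySem.Chars.splitOn.go ['\n'] fuel l cur acc = acc.reverse ++ pvSegs l cur := by
  induction l generalizing cur acc with
  | nil =>
      intro fuel h
      match fuel with
      | 0 => omega
      | fuel + 1 => simp [PySem.Chars.splitOn.go, pvSegs]
  | cons c rest ih =>
      intro fuel h
      match fuel with
      | 0 => omega
      | fuel + 1 =>
        rw [PySem.Chars.splitOn.go]
        by_cases hc : c = '\n'
        · subst hc
          simp only [List.isPrefixOf, List.length_cons] at *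
          rw [if_pos (by simp)]
          rw [show List.drop (([] : List Char).length + 1) ('\n' :: rest) = rest from by simp]
          rw [ih [] (cur.reverse :: acc) fuel (by omega)]
          simp [pvSegs]
        · rw [if_neg (by simp [List.isPrefixOf]; intro h'; exact hc h'.symm)]
          rw [ih (c :: cur) acc fuel (by simpa using Nat.lt_of_succ_lt_succ h)]
          simp [pvSegs, hc]

theorem pvSplitOn_eq (l : List Char) :
    PySem.Chars.splitOn l ['\n'] = pvSegs l [] := by
  rw [PySem.Chars.splitOn, pvSplitOn_go_eq l [] [] (l.length + 1) (by omega)]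
  simp

theorem pvFoldl_count (segs : List (List Char)) (acc : Int) :
    segs.foldl (fun acc seg => if seg.isEmpty then acc else acc + 1) acc
      = acc + pvCountNE segs := by
  induction segs generalizing acc with
  | nil => simp [pvCountNE]
  | cons s rest ih =>
      simp only [List.foldl_cons, pvCountNE, ih]
      split_ifs with h <;> ring

theorem pvAuto_eq_count (l : List Char) :
    ∀ (cnt : Int) (cur : List Char),
      (let st := l.foldl
        (fun (st : Int × Bool) caracter =>
          if caracter = '\n' then
            if st.2 then (st.1 + 1, false) else st
          else
            (st.1, true))
        (cnt, !cur.isEmpty);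
       if st.2 then st.1 + 1 else st.1)
      = cnt + pvCountNE (pvSegs l cur) := by
  induction l with
  | nil =>
      intro cnt cur
      simp only [List.foldl_nil, pvSegs, pvCountNE]
      cases cur <;> simp
  | cons c rest ih =>
      intro cnt cur
      by_cases hc : c = '\n'
      · subst hc
        cases cur with
        | nil =>
            simp only [List.foldl_cons, List.isEmpty_nil, Bool.not_true, ite_true,
              if_neg (by simp : ¬ (false = true))]
            have := ih cnt ([] : List Char)
            simp only [List.isEmpty_nil, Bool.not_true] at this
            rw [this]
            simp [pvSegs, pvCountNE]
        | cons d cur' =>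
            simp only [List.foldl_cons, List.isEmpty_cons, Bool.not_false, ite_true]
            have := ih (cnt + 1) ([] : List Char)
            simp only [List.isEmpty_nil, Bool.not_true] at this
            rw [this]
            simp [pvSegs, pvCountNE]
            ring
      · simp only [List.foldl_cons, if_neg hc]
        have := ih cnt (c :: cur)
        simp only [List.isEmpty_cons, Bool.not_false] at this
        rw [this]
        simp [pvSegs, hc]

-- ===== VERDICT (by name: the statement is the Claim_ definition above) =====
theorem contar_parrafos_spec : Claim_equal_contar_parrafos := by
  intro texto _
  unfold Spec_contar_parrafos contar_parrafos contar_parrafos_alt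
  rw [pvSplitOn_eq, pvFoldl_count]
  have := pvAuto_eq_count texto.toList 0 ([] : List Char)
  simp only [List.isEmpty_nil, Bool.not_true] at this
  rw [this]
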